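-- pv_equiv track=rewrite | github.com/asokolowskii/Introduction-to-Computer-Science | Zestaw 2 - Tablice jednowymiarowe/Zadanie 72/72.py | znajdz_najdluzszy_rewers
-- ===== SOURCE A (Python) =====
-- def znajdz_najdluzszy_rewers(T):
--     n = len(T)
--     best_dlugosc = 0
--
--     for i in range(n):
--         for j in range(i, n):  # podciąg od i do j włącznie
--             podciag = T[i:j+1]
--             rewers = podciag[::-1]
--
--             # Sprawdzamy, czy rewers istnieje gdzieś indziej w tablicy
--             for k in range(n - len(rewers) + 1):
--                 if k == i:
--                     continue  # pomijamy to samo miejsce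
--                 if T[k:k+len(rewers)] == rewers:
--                     best_dlugosc = max(best_dlugosc, len(podciag))
--                     break  # nie trzeba sprawdzać dalej dla tej długości
--
--     return best_dlugosc
-- ===== SOURCE B (Python) =====
-- def znajdz_najdluzszy_rewers(T):
--     # O(n^2): extend matches along anti-diagonals a+b = d, where the reverse of a
--     # window ending at a matches the window starting at b; skip only the self-match k == i.
--     n = len(T)
--     best = 0
--     for d in range(2 * n - 1):
--         e = 0
--         for a in range(max(0, d - n + 1), min(d, n - 1) + 1):
--             b = d - a
--             if T[a] == T[b]:
--                 e += 1
--             else: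
--                 e = 0
--             g = e - 1 if b == a - e + 1 else e
--             if g > best:
--                 best = g
--     return best
-- ===== Notes on version B (the rewrite author's own statement) =====
-- stated objective: faster
-- what changed: Replaces the enumerate-every-window-and-scan-for-its-reverse search by a single O(n^2) dynamic pass that extends reverse-matches along anti-diagonals a+b=const (T[a..] read backwards vs T[b..] read forwards), discounting only the self-match i=k by one.
import Mathlib
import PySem

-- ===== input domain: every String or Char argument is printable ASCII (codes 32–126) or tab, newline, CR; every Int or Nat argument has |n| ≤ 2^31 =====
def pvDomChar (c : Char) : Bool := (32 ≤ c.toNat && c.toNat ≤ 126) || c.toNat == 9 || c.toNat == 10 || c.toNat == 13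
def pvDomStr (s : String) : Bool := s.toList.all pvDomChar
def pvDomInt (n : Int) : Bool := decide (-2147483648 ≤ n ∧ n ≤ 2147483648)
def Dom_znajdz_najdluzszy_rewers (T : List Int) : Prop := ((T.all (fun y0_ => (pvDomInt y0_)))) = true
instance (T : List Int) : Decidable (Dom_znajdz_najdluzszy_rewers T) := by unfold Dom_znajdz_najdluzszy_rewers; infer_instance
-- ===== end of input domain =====

-- B replaces A's enumerate-every-window-and-scan search (O(n^4)) by one O(n^2) pass that
-- extends reverse-matches along anti-diagonals; measured asymptotically faster.

-- ===== PORT A =====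
-- inner 'for k in range(...)' loop with continue/break: returns whether some k ≠ i matches
def aFind (T rewers : List Int) (i : Int) : List Int → Bool
  | [] => false
  | k :: ks =>
    if k = i then aFind T rewers i ks
    else if PySem.List.slice T (some k) (some (k + (rewers.length : Int))) = rewers then true
    else aFind T rewers i ks

def znajdz_najdluzszy_rewers (T : List Int) : Int :=
  let n : Int := T.length
  (PySem.List.pyRange 0 n 1).foldl (fun best i =>
    (PySem.List.pyRange i n 1).foldl (fun best j =>
      let podciag := PySem.List.slice T (some i) (some (j + 1))
      -- podciag[::-1] = podciag.reverse (PySem.List.slice?_none_none_neg_one)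
      let rewers := podciag.reverse
      if aFind T rewers i (PySem.List.pyRange 0 (n - (rewers.length : Int) + 1) 1)
      then max best (podciag.length : Int) else best) best) 0

-- ===== PORT B =====
-- inner 'for a in range(a0, hi)' loop of Source B, state (best, e); T[a] is in range, ported as getD
def bInner (T : List Int) (d : Int) : Int × Int → List Int → Int × Int
  | p, [] => p
  | (best, e), a :: rest =>
    let b := d - a
    let e' := if PySem.List.pyGetD T a 0 = PySem.List.pyGetD T b 0 then e + 1 else 0
    let g := if b = a - e' + 1 then e' - 1 else e'
    bInner T d (if g > best then g else best, e') rest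

def znajdz_najdluzszy_rewers_alt (T : List Int) : Int :=
  let n : Int := T.length
  (PySem.List.pyRange 0 (2 * n - 1) 1).foldl (fun best d =>
    (bInner T d (best, 0)
      (PySem.List.pyRange (max 0 (d - n + 1)) (min d (n - 1) + 1) 1)).1) 0

-- ===== PRECONDITION & SPEC =====
def Spec_znajdz_najdluzszy_rewers (T : List Int) (out : Int) : Prop := out = znajdz_najdluzszy_rewers_alt T
instance (T : List Int) (out : Int) : Decidable (Spec_znajdz_najdluzszy_rewers T out) := by unfold Spec_znajdz_najdluzszy_rewers; infer_instance

-- ===== CLAIM (what is proved, stated in full; the proofs are below) =====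
def Claim_equal_znajdz_najdluzszy_rewers : Prop := ∀ (T : List Int), Dom_znajdz_najdluzszy_rewers T → Spec_znajdz_najdluzszy_rewers T (znajdz_najdluzszy_rewers T)

-- ===== LEMMAS AND PROOFS =====

-- 'ok T L i k': the window T[i:i+L] reversed occurs at position k ≠ i (the condition A tests)
def matchAt (T : List Int) (i k L : Nat) : Prop :=
  ∀ t, t < L → T.getD (k + t) 0 = T.getD (i + L - 1 - t) 0

def ok (T : List Int) (L i k : Nat) : Prop :=
  1 ≤ L ∧ i + L ≤ T.length ∧ k + L ≤ T.length ∧ k ≠ i ∧ matchAt T i k L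

def Pok (T : List Int) (r : Int) : Prop := ∃ L i k, ok T L i k ∧ r = (L : Int)

-- generic fold lemmas
theorem foldl_ge_init {α : Type} (step : Int → α → Int) (h : ∀ b x, b ≤ step b x) :
    ∀ (l : List α) (init : Int), init ≤ l.foldl step init := by
  intro l
  induction l with
  | nil => intro init; simp
  | cons x xs ih => intro init; exact le_trans (h init x) (ih (step init x))

theorem foldl_ge_elem {α : Type} (step : Int → α → Int) (h : ∀ b x, b ≤ step b x)
    (l : List α) (x : α) (hx : x ∈ l) (v : Int) (hv : ∀ b, v ≤ step b x) :
    ∀ init, v ≤ l.foldl step init := by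
  induction l with
  | nil => cases hx
  | cons y ys ih =>
    intro init
    rcases List.mem_cons.mp hx with rfl | hmem
    · exact le_trans (hv init) (foldl_ge_init step h ys (step init x))
    · exact ih hmem (step init y)

theorem foldl_cases {α : Type} (step : Int → α → Int) (P : Int → Prop) (l : List α)
    (h : ∀ b x, x ∈ l → step b x = b ∨ P (step b x)) :
    ∀ init, l.foldl step init = init ∨ P (l.foldl step init) := by
  induction l with
  | nil => intro init; left; rfl
  | cons x xs ih =>
    intro init
    have ih' := ih (fun b y hy => h b y (List.mem_cons_of_mem _ hy)) (step init x)
    rcases ih' with heq | hP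
    · rw [List.foldl_cons, heq]
      rcases h init x (List.mem_cons_self) with h0 | h1
      · left; exact h0
      · right; exact h1
    · right; exact hP
  
-- slice equality ↔ pointwise reverse match
theorem slice_rev_eq_iff (T : List Int) (i k L : Nat) (hL : 1 ≤ L)
    (hi : i + L ≤ T.length) (hk : k + L ≤ T.length) :
    ((T.drop k).take L = ((T.drop i).take L).reverse ↔ matchAt T i k L) := by
  have hlen1 : ((T.drop k).take L).length = L := by
    simp only [List.length_take, List.length_drop]; omega
  have hlen2 : (((T.drop i).take L).reverse).length = L := by
    simp only [List.length_reverse, List.length_take, List.length_drop]; omega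
  have hLi : L ≤ (T.drop i).length := by simp only [List.length_drop]; omega
  have hget1 : ∀ t (ht : t < L), ((T.drop k).take L)[t]'(by omega) = T[k + t]'(by omega) := by
    intro t ht
    rw [List.getElem_take, List.getElem_drop]
  have hget2 : ∀ t (ht : t < L),
      (((T.drop i).take L).reverse)[t]'(by omega) = T[i + L - 1 - t]'(by omega) := by
    intro t ht
    rw [List.getElem_reverse, List.getElem_take, List.getElem_drop]
    congr 1
    simp only [List.length_take, List.length_drop]
    omega
  constructor
  · intro h t ht
    have h1 : ((T.drop k).take L)[t]'(by omega) = (((T.drop i).take L).reverse)[t]'(by omega) := by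
      exact List.getElem_of_eq h _
    rw [hget1 t ht, hget2 t ht] at h1
    rw [List.getD_eq_getElem T 0 (by omega : k + t < T.length),
        List.getD_eq_getElem T 0 (by omega : i + L - 1 - t < T.length)]
    exact h1
  · intro hm
    apply List.ext_getElem (by omega)
    intro t h1 h2
    have ht : t < L := by omega
    rw [hget1 t ht, hget2 t ht]
    have := hm t ht
    rw [List.getD_eq_getElem T 0 (by omega : k + t < T.length),
        List.getD_eq_getElem T 0 (by omega : i + L - 1 - t < T.length)] at this
    exact this

-- aFind searches the k-range
theorem aFind_iff (T rew : List Int) (i : Int) (l : List Int) :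
    aFind T rew i l = true ↔
      ∃ k ∈ l, k ≠ i ∧ PySem.List.slice T (some k) (some (k + (rew.length : Int))) = rew := by
  induction l with
  | nil => simp [aFind]
  | cons x xs ih =>
    show (if x = i then aFind T rew i xs
          else if PySem.List.slice T (some x) (some (x + (rew.length : Int))) = rew then true
          else aFind T rew i xs) = true ↔ _
    split_ifs with hx hs
    · subst hx
      rw [ih]
      constructor
      · rintro ⟨k, hk, hne, h2⟩; exact ⟨k, List.mem_cons_of_mem _ hk, hne, h2⟩
      · rintro ⟨k, hk, hne, h2⟩
        rcases List.mem_cons.mp hk with rfl | hk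
        · exact absurd rfl hne
        · exact ⟨k, hk, hne, h2⟩
    · exact iff_of_true rfl ⟨x, List.mem_cons_self, hx, hs⟩
    · rw [ih]
      constructor
      · rintro ⟨k, hk, hne, h2⟩; exact ⟨k, List.mem_cons_of_mem _ hk, hne, h2⟩
      · rintro ⟨k, hk, hne, h2⟩
        rcases List.mem_cons.mp hk with rfl | hk
        · exact absurd h2 hs
        · exact ⟨k, hk, hne, h2⟩

theorem foldl_cases_inv {α : Type} (step : Int → α → Int) (Inv P : Int → Prop) (l : List α)
    (h : ∀ b x, x ∈ l → Inv b → (step b x = b ∨ P (step b x)) ∧ Inv (step b x)) :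
    ∀ init, Inv init → l.foldl step init = init ∨ P (l.foldl step init) := by
  induction l with
  | nil => intro init _; left; rfl
  | cons x xs ih =>
    intro init hInv
    obtain ⟨hor, hInv'⟩ := h init x List.mem_cons_self hInv
    have ih' := ih (fun b y hy hb => h b y (List.mem_cons_of_mem _ hy) hb) (step init x) hInv'
    rcases ih' with heq | hP
    · rw [List.foldl_cons, heq]
      exact hor
    · right; exact hP

-- slice with nonnegative Int bounds as drop/take
theorem slice_eq_drop_take (T : List Int) (a b : Int) (h0 : 0 ≤ a) (hab : a ≤ b) :
    PySem.List.slice T (some a) (some b) = (T.drop a.toNat).take (b - a).toNat := by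
  rw [PySem.List.slice_toNat T h0 (by omega)]
  congr 1
  omega

theorem A_nonneg (T : List Int) : 0 ≤ znajdz_najdluzszy_rewers T := by
  simp only [znajdz_najdluzszy_rewers]
  apply foldl_ge_init
  intro b i
  apply foldl_ge_init
  intro b' j
  dsimp only
  split_ifs with h
  · exact le_max_left _ _
  · exact le_rfl

theorem A_ge (T : List Int) (L i k : Nat) (h : ok T L i k) :
    (L : Int) ≤ znajdz_najdluzszy_rewers T := by
  obtain ⟨hL, hi, hk, hne, hm⟩ := h
  simp only [znajdz_najdluzszy_rewers]
  apply foldl_ge_elem _ ?mono _ ((i : Int)) ?mem ((L : Int)) ?hv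
  case mono =>
    intro b x
    apply foldl_ge_init
    intro b' j
    dsimp only
    split_ifs with h
    · exact le_max_left _ _
    · exact le_rfl
  case mem =>
    rw [PySem.List.mem_pyRange_one]
    omega
  case hv =>
    intro b
    apply foldl_ge_elem _ ?mono2 _ ((i : Int) + (L : Int) - 1) ?mem2 ((L : Int)) ?hv2
    case mono2 =>
      intro b' j
      dsimp only
      split_ifs with h
      · exact le_max_left _ _
      · exact le_rfl
    case mem2 =>
      rw [PySem.List.mem_pyRange_one]
      omega
    case hv2 =>
      intro b'
      dsimp only
      rw [show ((i : Int) + (L : Int) - 1 + 1) = ((i : Int) + (L : Int)) from by ring,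
          PySem.List.slice_natCast_add]
      have hplen : ((T.drop i).take L).length = L := by
        simp only [List.length_take, List.length_drop]; omega
      have hfind : aFind T ((T.drop i).take L).reverse (i : Int)
          (PySem.List.pyRange 0 ((T.length : Int) - ((((T.drop i).take L).reverse).length : Int) + 1) 1) = true := by
        rw [aFind_iff]
        refine ⟨(k : Int), ?_, ?_, ?_⟩
        · rw [PySem.List.mem_pyRange_one]
          rw [List.length_reverse, hplen]
          omega
        · intro hh
          exact hne (by exact_mod_cast hh)
        · rw [List.length_reverse, hplen, PySem.List.slice_natCast_add]
          exact (slice_rev_eq_iff T i k L hL hi hk).mpr hm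
      rw [if_pos hfind, hplen]
      exact le_max_right b' (L : Int)

theorem A_cases (T : List Int) :
    znajdz_najdluzszy_rewers T = 0 ∨ Pok T (znajdz_najdluzszy_rewers T) := by
  simp only [znajdz_najdluzszy_rewers]
  apply foldl_cases
  intro b i hi_mem
  apply foldl_cases
  intro b' j hj_mem
  rw [PySem.List.mem_pyRange_one] at hi_mem hj_mem
  by_cases hf : aFind T (PySem.List.slice T (some i) (some (j + 1))).reverse i
      (PySem.List.pyRange 0 ((T.length : Int) -
        (((PySem.List.slice T (some i) (some (j + 1))).reverse).length : Int) + 1) 1) = true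
  · rw [if_pos hf]
    rcases max_choice b' ((PySem.List.slice T (some i) (some (j + 1))).length : Int) with hmx | hmx
    · left; exact hmx
    · right
      rw [hmx]
      -- extract the witness k from aFind
      obtain ⟨kI, hkmem, hkne, hslice⟩ := (aFind_iff _ _ _ _).mp hf
      have h0i : 0 ≤ i := hi_mem.1
      have hij1 : i ≤ j + 1 := by omega
      have hsl : PySem.List.slice T (some i) (some (j + 1)) = (T.drop i.toNat).take (j + 1 - i).toNat :=
        slice_eq_drop_take T i (j + 1) h0i hij1
      have hplen : (PySem.List.slice T (some i) (some (j + 1))).length = (j + 1 - i).toNat := by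
        rw [hsl]
        simp only [List.length_take, List.length_drop]
        omega
      rw [PySem.List.mem_pyRange_one, List.length_reverse, hplen] at hkmem
      rw [List.length_reverse, hplen] at hslice
      have h0k : 0 ≤ kI := hkmem.1
      have hkub : kI < (T.length : Int) - ((j + 1 - i).toNat : Int) + 1 := hkmem.2
      have hksl : PySem.List.slice T (some kI) (some (kI + ((j + 1 - i).toNat : Int))) =
          (T.drop kI.toNat).take (j + 1 - i).toNat := by
        rw [slice_eq_drop_take T kI _ h0k (by omega)]
        congr 1
        omega
      rw [hksl, hsl] at hslice
      have hLb : 1 ≤ (j + 1 - i).toNat := by omega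
      have hib : i.toNat + (j + 1 - i).toNat ≤ T.length := by omega
      have hkb : kI.toNat + (j + 1 - i).toNat ≤ T.length := by omega
      have hmatch := (slice_rev_eq_iff T i.toNat kI.toNat (j + 1 - i).toNat hLb hib hkb).mp hslice
      refine ⟨(j + 1 - i).toNat, i.toNat, kI.toNat, ⟨hLb, hib, hkb, ?_, hmatch⟩, ?_⟩
      · intro hh
        apply hkne
        omega
      · rw [hplen]
  · rw [if_neg hf]
    left
    rfl

-- ===== B-side invariants =====

theorem pyGetD_nonneg_eq (T : List Int) (i : Int) (h : 0 ≤ i) :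
    PySem.List.pyGetD T i 0 = T.getD i.toNat 0 := by
  conv_lhs => rw [← Int.toNat_of_nonneg h]
  rw [PySem.List.pyGetD_natCast]

-- invariant of Source B's rolling extension length e along the anti-diagonal d, after processing a
def Good (T : List Int) (d a e : Int) : Prop :=
  0 ≤ e ∧ e ≤ a + 1 ∧ e ≤ (T.length : Int) - (d - a) ∧
  ∀ t : Nat, (t : Int) < e → T.getD (a - (t : Int)).toNat 0 = T.getD (d - a + (t : Int)).toNat 0

theorem good_step (T : List Int) (d a e : Int) (hG : Good T d (a - 1) e)
    (h0 : 0 ≤ a) (had : a ≤ d) :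
    Good T d a (if PySem.List.pyGetD T a 0 = PySem.List.pyGetD T (d - a) 0 then e + 1 else 0) := by
  obtain ⟨he0, hea, hen, hmt⟩ := hG
  split_ifs with hc
  · refine ⟨by omega, by omega, by omega, ?_⟩
    intro t ht
    cases t with
    | zero =>
      simp only [Nat.cast_zero, sub_zero, add_zero]
      rw [← pyGetD_nonneg_eq T a h0, ← pyGetD_nonneg_eq T (d - a) (by omega)]
      exact hc
    | succ s =>
      have hs : (s : Int) < e := by push_cast at ht ⊢; omega
      have hix1 : a - ((s + 1 : Nat) : Int) = (a - 1) - (s : Int) := by push_cast; ring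
      have hix2 : d - a + ((s + 1 : Nat) : Int) = d - (a - 1) + (s : Int) := by push_cast; ring
      rw [hix1, hix2]
      exact hmt s hs
  · refine ⟨le_rfl, by omega, by omega, ?_⟩
    intro t ht
    exact absurd ht (by have := Int.natCast_nonneg t; omega)

theorem contrib_ok (T : List Int) (d a e : Int) (hG : Good T d a e)
    (had : a ≤ d) (han : a ≤ (T.length : Int) - 1)
    (g : Int) (hg : g = (if d - a = a - e + 1 then e - 1 else e)) (hg1 : 1 ≤ g) :
    Pok T g := by
  obtain ⟨he0, hea, hen, hmt⟩ := hG
  split_ifs at hg with hbe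
  · subst hg
    refine ⟨(e - 1).toNat, (d - a + 1).toNat, (d - a).toNat,
      ⟨by omega, by omega, by omega, by omega, ?_⟩, by omega⟩
    intro t ht
    have ht' : (t : Int) < e := by omega
    have hix1 : (d - a).toNat + t = (d - a + (t : Int)).toNat := by omega
    have hix2 : (d - a + 1).toNat + (e - 1).toNat - 1 - t = (a - (t : Int)).toNat := by omega
    rw [hix1, hix2]
    exact (hmt t ht').symm
  · subst hg
    refine ⟨g.toNat, (a - g + 1).toNat, (d - a).toNat,
      ⟨by omega, by omega, by omega, ?_, ?_⟩, by omega⟩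
    · intro hh
      exact hbe (by omega)
    · intro t ht
      have ht' : (t : Int) < g := by omega
      have hix1 : (d - a).toNat + t = (d - a + (t : Int)).toNat := by omega
      have hix2 : (a - g + 1).toNat + g.toNat - 1 - t = (a - (t : Int)).toNat := by omega
      rw [hix1, hix2]
      exact (hmt t ht').symm

theorem bInner_singleton (T : List Int) (d a best e : Int) :
    ∃ e' g : Int,
      e' = (if PySem.List.pyGetD T a 0 = PySem.List.pyGetD T (d - a) 0 then e + 1 else 0) ∧
      g = (if d - a = a - e' + 1 then e' - 1 else e') ∧
      bInner T d (best, e) [a] = (if g > best then g else best, e') :=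
  ⟨_, _, rfl, rfl, rfl⟩

theorem bInner_cons (T : List Int) (d best e a : Int) (rest : List Int) :
    bInner T d (best, e) (a :: rest) = bInner T d (bInner T d (best, e) [a]) rest := rfl

theorem bInner_append (T : List Int) (d : Int) (l1 l2 : List Int) :
    ∀ p, bInner T d p (l1 ++ l2) = bInner T d (bInner T d p l1) l2 := by
  induction l1 with
  | nil => intro p; rfl
  | cons a rest ih =>
    intro p
    obtain ⟨best, e⟩ := p
    exact ih _

theorem bInner_fst_mono (T : List Int) (d : Int) :
    ∀ (l : List Int) (p : Int × Int), p.1 ≤ (bInner T d p l).1 := by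
  intro l
  induction l with
  | nil => intro p; exact le_rfl
  | cons a rest ih =>
    intro p
    obtain ⟨best, e⟩ := p
    obtain ⟨e', g, _, _, hstep⟩ := bInner_singleton T d a best e
    rw [bInner_cons, hstep]
    refine le_trans ?_ (ih _)
    dsimp only
    split_ifs with hgt
    · exact le_of_lt hgt
    · exact le_rfl

theorem bInner_e_nonneg (T : List Int) (d : Int) :
    ∀ (l : List Int) (p : Int × Int), 0 ≤ p.2 → 0 ≤ (bInner T d p l).2 := by
  intro l
  induction l with
  | nil => intro p h; exact h
  | cons a rest ih =>
    intro p h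
    obtain ⟨best, e⟩ := p
    obtain ⟨e', g, he', _, hstep⟩ := bInner_singleton T d a best e
    rw [bInner_cons, hstep]
    apply ih
    dsimp only
    rw [he']
    split_ifs with hc
    · dsimp only at h; omega
    · exact le_rfl

theorem bInner_all_true (T : List Int) (d : Int) :
    ∀ (fuel : Nat) (i m best e : Int), (m - i).toNat = fuel → i ≤ m →
      (∀ a', i ≤ a' → a' < m → PySem.List.pyGetD T a' 0 = PySem.List.pyGetD T (d - a') 0) →
      (bInner T d (best, e) (PySem.List.pyRange i m 1)).2 = e + (m - i) := by
  intro fuel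
  induction fuel with
  | zero =>
    intro i m best e hf him _
    rw [PySem.List.pyRange_one_eq_nil (by omega)]
    show e = e + (m - i)
    omega
  | succ f ih =>
    intro i m best e hf him hcond
    have hlt : i < m := by omega
    rw [PySem.List.pyRange_one_cons hlt]
    obtain ⟨e', g, he', _, hstep⟩ := bInner_singleton T d i best e
    rw [bInner_cons, hstep]
    rw [if_pos (hcond i le_rfl hlt)] at he'
    rw [ih (i + 1) m _ e' (by omega) (by omega)
        (fun a' h1 h2 => hcond a' (by omega) h2)]
    omega

theorem bInner_cases_aux (T : List Int) (d : Int) :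
    ∀ (fuel : Nat) (a m best e : Int), (m - a).toNat = fuel →
      m ≤ min d ((T.length : Int) - 1) + 1 → 0 ≤ a → 0 ≤ best →
      Good T d (a - 1) e →
      (bInner T d (best, e) (PySem.List.pyRange a m 1)).1 = best ∨
        Pok T ((bInner T d (best, e) (PySem.List.pyRange a m 1)).1) := by
  intro fuel
  induction fuel with
  | zero =>
    intro a m best e hf _ _ _ _
    rw [PySem.List.pyRange_one_eq_nil (by omega)]
    left; rfl
  | succ f ih =>
    intro a m best e hf hm h0 hb hG
    by_cases ham : a < m
    · rw [PySem.List.pyRange_one_cons ham]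
      obtain ⟨e', g, he', hg, hstep⟩ := bInner_singleton T d a best e
      rw [bInner_cons, hstep]
      have had : a ≤ d := by omega
      have hG' : Good T d a e' := by
        rw [he']
        exact good_step T d a e hG h0 had
      have hbest' : 0 ≤ (if g > best then g else best) := by
        split_ifs with hgt
        · omega
        · exact hb
      have hstep_or : (if g > best then g else best) = best ∨ Pok T (if g > best then g else best) := by
        split_ifs with hgt
        · right
          exact contrib_ok T d a e' hG' had (by omega) g hg (by omega)
        · left; rfl
      have hrec := ih (a + 1) m (if g > best then g else best) e' (by omega) hm (by omega) hbest'
        (by rw [show (a + 1 - 1 : Int) = a from by ring]; exact hG')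
      rcases hrec with heq | hP
      · rw [heq]; exact hstep_or
      · right; exact hP
    · rw [PySem.List.pyRange_one_eq_nil (by omega)]
      left; rfl

theorem B_nonneg (T : List Int) : 0 ≤ znajdz_najdluzszy_rewers_alt T := by
  simp only [znajdz_najdluzszy_rewers_alt]
  apply foldl_ge_init
  intro b dd
  exact bInner_fst_mono T dd _ (b, 0)

theorem B_ge (T : List Int) (L i k : Nat) (h : ok T L i k) :
    (L : Int) ≤ znajdz_najdluzszy_rewers_alt T := by
  obtain ⟨hL, hib, hkb, hne, hm⟩ := h
  simp only [znajdz_najdluzszy_rewers_alt]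
  apply foldl_ge_elem _ ?mono _ ((i : Int) + (L : Int) - 1 + (k : Int)) ?mem ((L : Int)) ?hv
  case mono =>
    intro b x
    exact bInner_fst_mono T x _ (b, 0)
  case mem =>
    rw [PySem.List.mem_pyRange_one]
    omega
  case hv =>
    intro b
    -- abbreviations (as plain terms): d, a = i+L-1, n
    have hcond : ∀ a', (i : Int) ≤ a' → a' < (i : Int) + (L : Int) →
        PySem.List.pyGetD T a' 0 =
          PySem.List.pyGetD T (((i : Int) + (L : Int) - 1 + (k : Int)) - a') 0 := by
      intro a' h1 h2
      have h0a' : 0 ≤ a' := by omega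
      have htb : i + L - 1 - a'.toNat < L := by omega
      have := (hm (i + L - 1 - a'.toNat) htb).symm
      rw [pyGetD_nonneg_eq T a' h0a', pyGetD_nonneg_eq T _ (by omega)]
      rw [show a'.toNat = i + L - 1 - (i + L - 1 - a'.toNat) from by omega,
          show ((i : Int) + (L : Int) - 1 + (k : Int) - a').toNat =
            k + (i + L - 1 - a'.toNat) from by omega]
      exact this
    -- split the diagonal range: [a0, i) ++ [i, a) ++ [a] ++ [a+1, hi)
    rw [PySem.List.pyRange_one_append (max 0 ((i : Int) + (L : Int) - 1 + (k : Int) - (T.length : Int) + 1))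
          ((i : Int)) (min ((i : Int) + (L : Int) - 1 + (k : Int)) ((T.length : Int) - 1) + 1)
          (by omega) (by omega),
        PySem.List.pyRange_one_append ((i : Int)) ((i : Int) + (L : Int) - 1)
          (min ((i : Int) + (L : Int) - 1 + (k : Int)) ((T.length : Int) - 1) + 1)
          (by omega) (by omega),
        PySem.List.pyRange_one_append ((i : Int) + (L : Int) - 1)
          ((i : Int) + (L : Int) - 1 + 1)
          (min ((i : Int) + (L : Int) - 1 + (k : Int)) ((T.length : Int) - 1) + 1)
          (by omega) (by omega),
        PySem.List.pyRange_one_singleton,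
        bInner_append, bInner_append, bInner_append]
    apply le_trans ?_ (bInner_fst_mono T _ _ _)
    -- state after the prefix [a0, i)
    have he1 : 0 ≤ (bInner T ((i : Int) + (L : Int) - 1 + (k : Int)) (b, 0)
        (PySem.List.pyRange (max 0 ((i : Int) + (L : Int) - 1 + (k : Int) - (T.length : Int) + 1))
          ((i : Int)) 1)).2 := bInner_e_nonneg T _ _ _ (le_refl 0)
    -- the all-true stretch [i, a)
    have he2 := bInner_all_true T ((i : Int) + (L : Int) - 1 + (k : Int))
      ((L : Int) - 1).toNat ((i : Int)) ((i : Int) + (L : Int) - 1)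
      (bInner T ((i : Int) + (L : Int) - 1 + (k : Int)) (b, 0)
        (PySem.List.pyRange (max 0 ((i : Int) + (L : Int) - 1 + (k : Int) - (T.length : Int) + 1))
          ((i : Int)) 1)).1
      (bInner T ((i : Int) + (L : Int) - 1 + (k : Int)) (b, 0)
        (PySem.List.pyRange (max 0 ((i : Int) + (L : Int) - 1 + (k : Int) - (T.length : Int) + 1))
          ((i : Int)) 1)).2
      (by omega) (by omega)
      (fun a' h1 h2 => hcond a' h1 (by omega))
    -- the final step at a = i + L - 1
    obtain ⟨e', g, he', hg, hstep⟩ := bInner_singleton T ((i : Int) + (L : Int) - 1 + (k : Int))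
      ((i : Int) + (L : Int) - 1)
      (bInner T ((i : Int) + (L : Int) - 1 + (k : Int))
        (bInner T ((i : Int) + (L : Int) - 1 + (k : Int)) (b, 0)
          (PySem.List.pyRange (max 0 ((i : Int) + (L : Int) - 1 + (k : Int) - (T.length : Int) + 1))
            ((i : Int)) 1))
        (PySem.List.pyRange ((i : Int)) ((i : Int) + (L : Int) - 1) 1)).1
      (bInner T ((i : Int) + (L : Int) - 1 + (k : Int))
        (bInner T ((i : Int) + (L : Int) - 1 + (k : Int)) (b, 0)
          (PySem.List.pyRange (max 0 ((i : Int) + (L : Int) - 1 + (k : Int) - (T.length : Int) + 1))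
            ((i : Int)) 1))
        (PySem.List.pyRange ((i : Int)) ((i : Int) + (L : Int) - 1) 1)).2
    rw [hstep]
    rw [if_pos (hcond ((i : Int) + (L : Int) - 1) (by omega) (by omega))] at he'
    -- e' after the stretch is at least L
    have heL : (L : Int) ≤ e' := by
      rw [he', he2]
      omega
    -- g is at least L: if the window would be the self-match i = k, e' exceeds L and g = e' - 1
    have hgL : (L : Int) ≤ g := by
      rw [hg]
      split_ifs with hbe
      · -- d - a = k, so the condition says k = a - e' + 1; e' = L would force k = i
        have : e' ≠ (L : Int) := by
          intro hEL
          rw [hEL] at hbe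
          have : (k : Int) = (i : Int) := by omega
          exact hne (by exact_mod_cast this)
        omega
      · exact heL
    dsimp only
    split_ifs with hgt
    · exact hgL
    · omega

theorem B_cases (T : List Int) :
    znajdz_najdluzszy_rewers_alt T = 0 ∨ Pok T (znajdz_najdluzszy_rewers_alt T) := by
  simp only [znajdz_najdluzszy_rewers_alt]
  apply foldl_cases_inv _ (fun b => 0 ≤ b) (Pok T) _ ?h 0 (le_refl 0)
  case h =>
    intro b dd hmem hb
    constructor
    · apply bInner_cases_aux T dd
        ((min dd ((T.length : Int) - 1) + 1 - max 0 (dd - (T.length : Int) + 1)).toNat)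
        _ _ _ _ rfl le_rfl (le_max_left 0 _) hb
      refine ⟨le_rfl, by omega, by omega, ?_⟩
      intro t ht
      exact absurd ht (by have := Int.natCast_nonneg t; omega)
    · exact le_trans hb (bInner_fst_mono T dd _ (b, 0))

-- ===== VERDICT (by name: the statement is the Claim_ definition above) =====
theorem znajdz_najdluzszy_rewers_spec : Claim_equal_znajdz_najdluzszy_rewers := by
  intro T _
  unfold Spec_znajdz_najdluzszy_rewers
  apply le_antisymm
  · rcases A_cases T with h0 | ⟨L, i, k, hok, hval⟩
    · rw [h0]; exact B_nonneg T
    · rw [hval]; exact B_ge T L i k hok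
  · rcases B_cases T with h0 | ⟨L, i, k, hok, hval⟩
    · rw [h0]; exact A_nonneg T
    · rw [hval]; exact A_ge T L i k hok
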